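-- pv_equiv track=rewrite | github.com/pypi-data/pypi-mirror-24 | packages/intellimatch/intellimatch-0.3.0.tar.gz/intellimatch-0.3.0/intellimatch/match_datetimes.py | pad_all_single_digits_with_zero
-- ===== SOURCE A (Python) =====
-- def string_represents_int(s):
--     try:
--         int(s)
--         return True
--     except:
--         return False
--
-- def pad_all_single_digits_with_zero(datetime_input):
--     """ user may say '2017-3-4 10:00', but python cannot accept this...we need '2017-03-04 10:00' """
--     # http://stackoverflow.com/questions/3748063/what-is-the-syntax-to-insert-one-list-into-another-list-in-python
--     # >>> l = [1, 2, 3, 4, 5]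
--     # >>> l[2:4] = ['a', 'b', 'c'][1:3]
--     # >>> l
--     # [1, 2, 'b', 'c', 5]
--     needed_pad = False
--     for i, char in enumerate(datetime_input):
--         if i == 0 and string_represents_int(char): # if at beginning
--             try:
--                 _ = int(datetime_input[i + 1])
--             except:
--                 return pad_all_single_digits_with_zero('0' + datetime_input)
--         elif i == len(datetime_input): # if at the end
--             return datetime_input
--         elif  string_represents_int(char): # if somewhere in the middle
--             int_fails = 0
--             try:
--                 _ = int(datetime_input[i - 1])
--             except:
--                 int_fails += 1
--             try:
--                 _ = int(datetime_input[i + 1])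
--             except:
--                 int_fails += 1
--             if int_fails == 2:
--                 return pad_all_single_digits_with_zero(datetime_input[:i] + '0' + datetime_input[i:])
--     return datetime_input
-- ===== SOURCE B (Python) =====
-- def pad_all_single_digits_with_zero(datetime_input):
--     """ user may say '2017-3-4 10:00', but python cannot accept this...we need '2017-03-04 10:00' """
--     s = datetime_input
--     out = []
--     prev_is_digit = False
--     for i, c in enumerate(s):
--         next_is_digit = i + 1 < len(s) and s[i + 1].isdigit()
--         if c.isdigit() and not prev_is_digit and not next_is_digit:
--             out.append('0')
--         out.append(c)
--         prev_is_digit = c.isdigit()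
--     return ''.join(out)
-- ===== Notes on version B (the rewrite author's own statement) =====
-- stated objective: faster
-- what changed: A restarts itself from scratch (rescanning the whole string, with a slicing copy) every time it inserts one '0'; B makes a single left-to-right pass that checks each character's neighbours and emits the padded output once.
import Mathlib
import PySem

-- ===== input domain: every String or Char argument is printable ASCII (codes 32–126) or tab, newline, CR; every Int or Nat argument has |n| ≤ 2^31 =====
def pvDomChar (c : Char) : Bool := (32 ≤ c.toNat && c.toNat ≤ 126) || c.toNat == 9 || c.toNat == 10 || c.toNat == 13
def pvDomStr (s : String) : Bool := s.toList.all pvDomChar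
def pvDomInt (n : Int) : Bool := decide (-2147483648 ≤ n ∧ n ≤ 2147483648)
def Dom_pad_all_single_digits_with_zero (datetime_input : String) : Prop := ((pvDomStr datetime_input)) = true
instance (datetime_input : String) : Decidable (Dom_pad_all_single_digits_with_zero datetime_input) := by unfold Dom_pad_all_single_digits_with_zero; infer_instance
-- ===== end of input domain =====

-- B replaces A's restart-from-scratch recursion (rescan the whole string after every insertion)
-- by a single left-to-right pass that pads each isolated digit as it is met; objective: faster.

-- ===== PORT A =====
-- helper string_represents_int: try int(s) / except — int(s) is PySem.Int.ofStr? (none = ValueError)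
def string_represents_int (s : String) : Bool := (PySem.Int.ofStr? s).isSome

-- the two ways A's loop can exit early: `return datetime_input` / a recursive call's argument
inductive PadAct where
  | ret : List Char → PadAct
  | recur : List Char → PadAct
deriving DecidableEq, Repr

-- A's `for i, char in enumerate(datetime_input)` loop body, branch for branch;
-- `try: int(datetime_input[i±1]) / except:` is `PySem.List.pyGet?` (none = IndexError) + ofChars? (none = ValueError)
def padLoop (d : List Char) : List (Int × Char) → Option PadAct
  | [] => none
  | (i, c) :: rest =>
    if i == 0 && string_represents_int (String.ofList [c]) then
      match PySem.List.pyGet? d (i + 1) with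
      | some c1 =>
          if (PySem.Int.ofChars? [c1]).isSome then padLoop d rest
          else some (PadAct.recur ('0' :: d))
      | none => some (PadAct.recur ('0' :: d))
    else if i == (d.length : Int) then
      some (PadAct.ret d)
    else if string_represents_int (String.ofList [c]) then
      let f1 : Nat := match PySem.List.pyGet? d (i - 1) with
        | some c0 => if (PySem.Int.ofChars? [c0]).isSome then 0 else 1
        | none => 1
      let f2 : Nat := match PySem.List.pyGet? d (i + 1) with
        | some c1 => if (PySem.Int.ofChars? [c1]).isSome then 0 else 1
        | none => 1
      if f1 + f2 = 2 then
        -- datetime_input[:i] + '0' + datetime_input[i:]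
        some (PadAct.recur (PySem.List.slice d none (some i) ++ '0' :: PySem.List.slice d (some i) none))
      else padLoop d rest
    else padLoop d rest

-- A's self-recursion; the fuel argument is a totality guard only (each recursive call
-- removes one isolated digit, so |input|+1 steps are never exhausted)
def padAFuel : Nat → List Char → List Char
  | 0, d => d
  | Nat.succ n, d =>
    match padLoop d (PySem.List.enumerate d) with
    | some (PadAct.ret s) => s
    | some (PadAct.recur s) => padAFuel n s
    | none => d

def pad_all_single_digits_with_zero (datetime_input : String) : String :=
  String.ofList (padAFuel (datetime_input.toList.length + 1) datetime_input.toList)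

-- ===== PORT B =====
-- one pass, carrying `prev_is_digit` and peeking at the next character
def bGo (prev : Bool) : List Char → List Char
  | [] => []
  | c :: rest =>
    let nxt : Bool := match rest with
      | [] => false
      | c1 :: _ => PySem.Chars.isdigit c1
    (if PySem.Chars.isdigit c && !prev && !nxt then ['0', c] else [c]) ++ bGo (PySem.Chars.isdigit c) rest

def pad_all_single_digits_with_zero_alt (datetime_input : String) : String :=
  String.ofList (bGo false datetime_input.toList)

-- ===== PRECONDITION & SPEC =====
def Spec_pad_all_single_digits_with_zero (datetime_input : String) (out : String) : Prop := out = pad_all_single_digits_with_zero_alt datetime_input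
instance (datetime_input : String) (out : String) : Decidable (Spec_pad_all_single_digits_with_zero datetime_input out) := by unfold Spec_pad_all_single_digits_with_zero; infer_instance

-- ===== CLAIM (what is proved, stated in full; the proofs are below) =====
def Claim_equal_pad_all_single_digits_with_zero : Prop := ∀ (datetime_input : String), Dom_pad_all_single_digits_with_zero datetime_input → Spec_pad_all_single_digits_with_zero datetime_input (pad_all_single_digits_with_zero datetime_input)

-- ===== LEMMAS AND PROOFS =====

-- "the next character is a digit" for a suffix
def nxtDig : List Char → Bool
  | [] => false
  | c :: _ => PySem.Chars.isdigit c

def optDig : Option Char → Bool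
  | none => false
  | some c => PySem.Chars.isdigit c

-- "the character before position k in d is a digit" (false at k = 0)
def pvPrev (d : List Char) (k : Nat) : Bool := decide (k ≠ 0) && optDig d[k-1]?

-- position is an isolated digit
def trig (prev : Bool) (c : Char) (rest : List Char) : Bool :=
  PySem.Chars.isdigit c && !prev && !nxtDig rest

-- index of the first isolated digit
def findIso (prev : Bool) : List Char → Option Nat
  | [] => none
  | c :: rest => if trig prev c rest then some 0 else (findIso (PySem.Chars.isdigit c) rest).map (· + 1)

-- number of isolated digits
def cntIso (prev : Bool) : List Char → Nat
  | [] => 0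
  | c :: rest => (if trig prev c rest then 1 else 0) + cntIso (PySem.Chars.isdigit c) rest

-- insert '0' before position i
def ins (d : List Char) (i : Nat) : List Char := d.take i ++ '0' :: d.drop i

lemma bGo_cons (prev : Bool) (c : Char) (rest : List Char) :
    bGo prev (c :: rest) =
      (if trig prev c rest then ['0', c] else [c]) ++ bGo (PySem.Chars.isdigit c) rest := by
  cases rest <;> rfl

lemma dig0 : PySem.Chars.isdigit '0' = true := by decide

lemma trig_parts {p : Bool} {c : Char} {r : List Char} (h : trig p c r = true) :
    PySem.Chars.isdigit c = true ∧ p = false ∧ nxtDig r = false := by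
  simp [trig] at h
  tauto

-- int(c) succeeds on a domain character exactly when it is an ASCII digit
lemma ofChars_singleton (c : Char) (h : pvDomChar c = true) :
    (PySem.Int.ofChars? [c]).isSome = PySem.Chars.isdigit c := by
  have hle : c.toNat ≤ 126 := by
    simp [pvDomChar] at h
    omega
  have h2 : Char.ofNat c.toNat = c := Char.ofNat_toNat c
  rw [← h2]
  generalize c.toNat = n at hle
  interval_cases n <;> decide

lemma sri_singleton (c : Char) (h : pvDomChar c = true) :
    string_represents_int (String.ofList [c]) = PySem.Chars.isdigit c := by
  rw [string_represents_int, PySem.Int.ofStr?_ofList, ofChars_singleton c h]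

lemma bGo_of_findIso_none :
    ∀ (t : List Char) (prev : Bool), findIso prev t = none → bGo prev t = t := by
  intro t
  induction t with
  | nil => intro prev _; rfl
  | cons c rest ih =>
    intro prev h
    rw [findIso] at h
    by_cases htr : trig prev c rest = true
    · simp [htr] at h
    · rw [Bool.not_eq_true] at htr
      simp [htr, Option.map_eq_none_iff] at h
      rw [bGo_cons]
      simp [htr, ih _ h]

lemma nxtDig_ins (t : List Char) (p : Bool) (j : Nat) (h : findIso p t = some j) :
    nxtDig (ins t j) = nxtDig t := by
  cases t with
  | nil => simp [findIso] at h
  | cons c1 r =>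
    rw [findIso] at h
    by_cases htr : trig p c1 r = true
    · simp [htr] at h
      subst h
      have hd : PySem.Chars.isdigit c1 = true := (trig_parts htr).1
      simp [ins, nxtDig, hd]
      decide
    · rw [Bool.not_eq_true] at htr
      simp [htr] at h
      obtain ⟨j', _, hj⟩ := h
      subst hj
      simp [ins, nxtDig]

lemma cntIso_ins :
    ∀ (t : List Char) (prev : Bool) (j : Nat), findIso prev t = some j →
      cntIso prev (ins t j) < cntIso prev t := by
  intro t
  induction t with
  | nil => intro prev j h; simp [findIso] at h
  | cons c rest ih =>
    intro prev j h
    rw [findIso] at h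
    by_cases htr : trig prev c rest = true
    · simp [htr] at h
      subst h
      have hd : PySem.Chars.isdigit c = true := (trig_parts htr).1
      have h0 : trig prev '0' (c :: rest) = false := by
        simp [trig, nxtDig, hd]
      have h1 : trig true c rest = false := by simp [trig]
      simp only [ins, List.take_zero, List.drop_zero, List.nil_append, cntIso, h0, dig0, h1, htr]
      simp
    · rw [Bool.not_eq_true] at htr
      simp [htr] at h
      obtain ⟨j', hj', hj⟩ := h
      subst hj
      have hins : ins (c :: rest) (j' + 1) = c :: ins rest j' := by
        simp [ins]
      rw [hins, cntIso, cntIso]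
      have htr2 : trig prev c (ins rest j') = trig prev c rest := by
        simp [trig, nxtDig_ins rest _ j' hj']
      rw [htr2, htr]
      simp only [Bool.false_eq_true, if_false]
      simpa using ih _ j' hj'

lemma bGo_ins :
    ∀ (t : List Char) (prev : Bool) (j : Nat), findIso prev t = some j →
      bGo prev (ins t j) = bGo prev t := by
  intro t
  induction t with
  | nil => intro prev j h; simp [findIso] at h
  | cons c rest ih =>
    intro prev j h
    rw [findIso] at h
    by_cases htr : trig prev c rest = true
    · simp [htr] at h
      subst h
      have hd : PySem.Chars.isdigit c = true := (trig_parts htr).1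
      have h0 : trig prev '0' (c :: rest) = false := by simp [trig, nxtDig, hd]
      have h1 : trig true c rest = false := by simp [trig]
      simp only [ins, List.take_zero, List.drop_zero, List.nil_append]
      rw [bGo_cons, bGo_cons, bGo_cons]
      simp only [h0, dig0, h1, htr, Bool.false_eq_true, if_false, if_true]
      simp
    · rw [Bool.not_eq_true] at htr
      simp [htr] at h
      obtain ⟨j', hj', hj⟩ := h
      subst hj
      have hins : ins (c :: rest) (j' + 1) = c :: ins rest j' := by simp [ins]
      rw [hins, bGo_cons, bGo_cons]
      have htr2 : trig prev c (ins rest j') = trig prev c rest := by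
        simp [trig, nxtDig_ins rest _ j' hj']
      rw [htr2, htr, ih _ j' hj']

lemma cntIso_le_length : ∀ (t : List Char) (prev : Bool), cntIso prev t ≤ t.length := by
  intro t
  induction t with
  | nil => intro prev; simp [cntIso]
  | cons c rest ih =>
    intro prev
    rw [cntIso]
    have := ih (PySem.Chars.isdigit c)
    by_cases htr : trig prev c rest = true <;> simp [htr, List.length_cons] <;> omega

-- the "loop continues" case: the result on the tail suffix, re-indexed to the cons suffix
lemma contCase (d : List Char) (c : Char) (rest : List Char) (k : Nat)
    (ihk : padLoop d (PySem.List.enumerate rest (k+1)) =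
      (findIso (pvPrev d (k+1)) rest).map (fun j => PadAct.recur (ins d (k + 1 + j))))
    (hp1 : pvPrev d (k+1) = PySem.Chars.isdigit c)
    (htr : trig (pvPrev d k) c rest = false) :
    padLoop d (PySem.List.enumerate rest (k+1)) =
      (findIso (pvPrev d k) (c :: rest)).map (fun j => PadAct.recur (ins d (k + j))) := by
  rw [ihk, hp1, findIso, htr]
  simp only [Bool.false_eq_true, if_false, Option.map_map]
  cases hf : findIso (PySem.Chars.isdigit c) rest with
  | none => simp
  | some j =>
    simp only [Option.map_some, Function.comp]
    have : k + 1 + j = k + (j + 1) := by omega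
    rw [this]

-- characterisation of one full pass of A's loop: it returns the recursion argument
-- built at the first isolated digit at or after position k (given d.drop k is the suffix)
lemma padLoop_spec (d : List Char) (hdom : ∀ c ∈ d, pvDomChar c = true) :
    ∀ (t : List Char) (k : Nat), d.drop k = t →
    padLoop d (PySem.List.enumerate t k) =
      (findIso (pvPrev d k) t).map (fun j => PadAct.recur (ins d (k + j))) := by
  intro t
  induction t with
  | nil =>
    intro k ht
    simp [padLoop, findIso, PySem.List.enumerate]
  | cons c rest ih =>
    intro k ht
    have hk : d[k]? = some c := by rw [← List.head?_drop, ht]; rfl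
    have hklen : k < d.length := (List.getElem?_eq_some_iff.mp hk).1
    have hdrop1 : d.drop (k+1) = rest := by
      have h1 : (d.drop k).tail = d.drop (k+1) := List.tail_drop
      rw [← h1, ht]; rfl
    have hk1 : d[k+1]? = rest.head? := by rw [← List.head?_drop, hdrop1]
    have hcd : pvDomChar c = true :=
      hdom c (List.mem_of_mem_drop (i := k) (by rw [ht]; exact List.mem_cons_self))
    have hget1 : PySem.List.pyGet? d ((k : Int) + 1) = rest.head? := by
      have h2 : ((k : Int) + 1) = ((k + 1 : Nat) : Int) := by push_cast; ring
      rw [h2, PySem.List.pyGet?_natCast, hk1]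
    have hrestdom : ∀ c' ∈ rest, pvDomChar c' = true := by
      intro c' hc'
      exact hdom c' (List.mem_of_mem_drop (i := k + 1) (hdrop1 ▸ hc'))
    have ihk : padLoop d (PySem.List.enumerate rest ((k : Int) + 1)) =
        (findIso (pvPrev d (k+1)) rest).map (fun j => PadAct.recur (ins d (k + 1 + j))) := by
      have h3 := ih (k+1) hdrop1
      have h4 : (((k+1 : Nat)) : Int) = (k : Int) + 1 := by push_cast; ring
      rw [h4] at h3
      exact h3
    have hprev1 : pvPrev d (k+1) = PySem.Chars.isdigit c := by
      simp [pvPrev, hk, optDig]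
    rw [PySem.List.enumerate_cons, padLoop]
    cases k with
    | zero =>
      have hprev0 : pvPrev d 0 = false := by simp [pvPrev]
      by_cases hd : PySem.Chars.isdigit c = true
      · have hsri : string_represents_int (String.ofList [c]) = true := by
          rw [sri_singleton c hcd]; exact hd
        simp only [Nat.cast_zero, beq_self_eq_true, Bool.true_and, hsri, if_true]
        rw [show ((0 : Int) + 1) = ((0 : Nat) : Int) + 1 by norm_num, hget1]
        cases hrest : rest with
        | nil =>
          subst hrest
          simp only [List.head?_nil]
          rw [hprev0, findIso]
          have htr : trig false c [] = true := by simp [trig, nxtDig, hd]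
          simp [htr, ins]
        | cons c1 r =>
          subst hrest
          have hc1d : pvDomChar c1 = true := hrestdom c1 List.mem_cons_self
          simp only [List.head?_cons, ofChars_singleton c1 hc1d]
          by_cases hd1 : PySem.Chars.isdigit c1 = true
          · simp only [hd1, if_true]
            refine contCase d c (c1 :: r) 0 ihk hprev1 ?_
            simp [trig, nxtDig, hd1, hprev0]
          · rw [Bool.not_eq_true] at hd1
            simp only [hd1, Bool.false_eq_true, if_false]
            rw [hprev0, findIso]
            have htr : trig false c (c1 :: r) = true := by
              simp [trig, nxtDig, hd, hd1]
            simp [htr, ins]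
      · rw [Bool.not_eq_true] at hd
        have hsri : string_represents_int (String.ofList [c]) = false := by
          rw [sri_singleton c hcd]; exact hd
        have hne : (((0 : Int)) == (d.length : Int)) = false := by
          simp
          omega
        simp only [Nat.cast_zero, hsri, Bool.and_false, Bool.false_eq_true, if_false, hne]
        rw [show ((0 : Int) + 1) = ((0 : Nat) : Int) + 1 by norm_num]
        refine contCase d c rest 0 ihk hprev1 ?_
        simp [trig, hd]
    | succ m =>
      have hne0 : ((((m+1) : Nat) : Int) == 0) = false := by
        simp
        omega
      have hnel : ((((m+1) : Nat) : Int) == (d.length : Int)) = false := by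
        simp; omega
      have hgetm : PySem.List.pyGet? d ((((m+1) : Nat) : Int) - 1) = d[m]? := by
        have h5 : ((((m+1) : Nat) : Int) - 1) = ((m : Nat) : Int) := by push_cast; ring
        rw [h5, PySem.List.pyGet?_natCast]
      have hmlen : m < d.length := by omega
      obtain ⟨cm, hcm⟩ : ∃ cm, d[m]? = some cm := ⟨d[m], List.getElem?_eq_getElem hmlen⟩
      have hcmd : pvDomChar cm = true := hdom cm (List.mem_of_getElem? hcm)
      have hprevm : pvPrev d (m+1) = PySem.Chars.isdigit cm := by
        simp [pvPrev, hcm, optDig]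
      simp only [hne0, Bool.false_and, Bool.false_eq_true, if_false, hnel]
      by_cases hd : PySem.Chars.isdigit c = true
      · have hsri : string_represents_int (String.ofList [c]) = true := by
          rw [sri_singleton c hcd]; exact hd
        simp only [hsri, if_true]
        rw [hgetm, hcm]
        simp only [hget1, ofChars_singleton cm hcmd]
        cases hrest : rest with
        | nil =>
          subst hrest
          simp only [List.head?_nil]
          by_cases hdm : PySem.Chars.isdigit cm = true
          · simp only [hdm, if_true]
            norm_num
            refine contCase d c [] (m+1) ihk hprev1 ?_
            simp [trig, hprevm, hdm]
          · rw [Bool.not_eq_true] at hdm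
            simp only [hdm, Bool.false_eq_true, if_false]
            norm_num
            rw [hprevm, findIso]
            have htr : trig (PySem.Chars.isdigit cm) c [] = true := by
              simp [trig, nxtDig, hd, hdm]
            simp [htr, ins]
            rw [PySem.List.slice_to d (by omega), PySem.List.slice_from d (by omega)]
            have h9 : ((m : Int) + 1).toNat = m + 1 := by omega
            rw [h9]
        | cons c1 r =>
          subst hrest
          have hc1d : pvDomChar c1 = true := hrestdom c1 List.mem_cons_self
          simp only [List.head?_cons, ofChars_singleton c1 hc1d]
          by_cases hdm : PySem.Chars.isdigit cm = true
          · simp only [hdm, if_true]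
            have hcond : ¬ ((0 : Nat) + (if PySem.Chars.isdigit c1 = true then (0:Nat) else 1) = 2) := by
              split <;> omega
            simp only [if_neg hcond]
            refine contCase d c (c1 :: r) (m+1) ihk hprev1 ?_
            simp [trig, hprevm, hdm]
          · rw [Bool.not_eq_true] at hdm
            simp only [hdm, Bool.false_eq_true, if_false]
            by_cases hd1 : PySem.Chars.isdigit c1 = true
            · simp only [hd1, if_true]
              norm_num
              refine contCase d c (c1 :: r) (m+1) ihk hprev1 ?_
              simp [trig, nxtDig, hd1]
            · rw [Bool.not_eq_true] at hd1
              simp only [hd1, Bool.false_eq_true, if_false]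
              norm_num
              rw [hprevm, findIso]
              have htr : trig (PySem.Chars.isdigit cm) c (c1 :: r) = true := by
                simp [trig, nxtDig, hd, hdm, hd1]
              simp [htr, ins]
              rw [PySem.List.slice_to d (by omega), PySem.List.slice_from d (by omega)]
              have h9 : ((m : Int) + 1).toNat = m + 1 := by omega
              rw [h9]
      · rw [Bool.not_eq_true] at hd
        have hsri : string_represents_int (String.ofList [c]) = false := by
          rw [sri_singleton c hcd]; exact hd
        simp only [hsri, Bool.false_eq_true, if_false]
        refine contCase d c rest (m+1) ihk hprev1 ?_
        simp [trig, hd]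

lemma ins_dom (d : List Char) (i : Nat) (hdom : ∀ c ∈ d, pvDomChar c = true) :
    ∀ c ∈ ins d i, pvDomChar c = true := by
  intro c hc
  rw [ins] at hc
  rcases List.mem_append.mp hc with h | h
  · exact hdom c (List.mem_of_mem_take h)
  · rcases List.mem_cons.mp h with h | h
    · subst h; decide
    · exact hdom c (List.mem_of_mem_drop h)

lemma padAFuel_eq :
    ∀ (n : Nat) (d : List Char), (∀ c ∈ d, pvDomChar c = true) → cntIso false d < n →
      padAFuel n d = bGo false d := by
  intro n
  induction n with
  | zero => intro d _ h; omega
  | succ n ih =>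
    intro d hdom hcnt
    have hloop0 := padLoop_spec d hdom d 0 (by simp)
    have hprev0 : pvPrev d 0 = false := by simp [pvPrev]
    rw [hprev0] at hloop0
    have hloop : padLoop d (PySem.List.enumerate d) =
        (findIso false d).map (fun j => PadAct.recur (ins d j)) := by
      simpa using hloop0
    rw [padAFuel]
    cases hfind : findIso false d with
    | none =>
      rw [hfind, Option.map_none] at hloop
      rw [hloop]
      exact (bGo_of_findIso_none d false hfind).symm
    | some i =>
      rw [hfind, Option.map_some] at hloop
      rw [hloop]
      have hlt := cntIso_ins d false i hfind
      have heq := ih (ins d i) (ins_dom d i hdom) (by omega)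
      exact heq.trans (bGo_ins d false i hfind)

-- ===== VERDICT (by name: the statement is the Claim_ definition above) =====
theorem pad_all_single_digits_with_zero_spec : Claim_equal_pad_all_single_digits_with_zero := by
  intro s hdom
  unfold Spec_pad_all_single_digits_with_zero
  unfold pad_all_single_digits_with_zero pad_all_single_digits_with_zero_alt
  have hdom' : ∀ c ∈ s.toList, pvDomChar c = true := by
    have := hdom
    unfold Dom_pad_all_single_digits_with_zero pvDomStr at this
    exact fun c hc => List.all_eq_true.mp this c hc
  have := padAFuel_eq (s.toList.length + 1) s.toList hdom'
    (by have := cntIso_le_length s.toList false; omega)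
  rw [this]
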